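-- pv_equiv track=rewrite | github.com/Rajivrocks-Ltd/SNACS | 1/A1/main.py | count_open_wedges
-- ===== SOURCE A (Python) =====
-- def count_open_wedges(input_graph):
--     """
--     Count the number of open wedges in the undirected graph.
--
--     :param input_graph: The undirected graph represented as an adjacency list (dict of sets).
--     :return: The total number of open wedges in the graph.
--     """
--     open_wedges_count = 0
--
--     # Iterate over all nodes in the graph.
--     for v in input_graph:
--         neighbours = sorted(input_graph[v])  # Get the neighbours of node v. We sort them to avoid getting different
--         # results
--
--         # Iterate over all pairs of neighbours of v.
--         for i in range(len(neighbours)):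
--             for j in range(i + 1, len(neighbours)):
--                 u = neighbours[i]
--                 w = neighbours[j]
--
--                 # Check if there is no edge between u and w.
--                 if w not in input_graph[u]:
--                     # If there is no edge, we have an open wedge (u, v, w).
--                     open_wedges_count += 1
--
--     return open_wedges_count
-- ===== SOURCE B (Python) =====
-- def count_open_wedges(input_graph):
--     """Complement counting: per node, open wedges = C(k,2) minus closed pairs,
--     closed pairs counted with a set intersection per anchor neighbour instead of a pair loop."""
--     total = 0
--     for v in input_graph:
--         ns = sorted(input_graph[v])
--         k = len(ns)
--         total += k * (k - 1) // 2
--         for i in range(k - 1):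
--             total -= len(input_graph[ns[i]].intersection(ns[i + 1:]))
--     return total
-- ===== Notes on version B (the rewrite author's own statement) =====
-- stated objective: alternative
-- what changed: B counts open wedges by complement: per node it adds C(k,2) in closed form and subtracts the closed neighbour pairs, obtained as one set-intersection cardinality per anchor neighbour, instead of A's nested loop testing membership for every neighbour pair.
import Mathlib
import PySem

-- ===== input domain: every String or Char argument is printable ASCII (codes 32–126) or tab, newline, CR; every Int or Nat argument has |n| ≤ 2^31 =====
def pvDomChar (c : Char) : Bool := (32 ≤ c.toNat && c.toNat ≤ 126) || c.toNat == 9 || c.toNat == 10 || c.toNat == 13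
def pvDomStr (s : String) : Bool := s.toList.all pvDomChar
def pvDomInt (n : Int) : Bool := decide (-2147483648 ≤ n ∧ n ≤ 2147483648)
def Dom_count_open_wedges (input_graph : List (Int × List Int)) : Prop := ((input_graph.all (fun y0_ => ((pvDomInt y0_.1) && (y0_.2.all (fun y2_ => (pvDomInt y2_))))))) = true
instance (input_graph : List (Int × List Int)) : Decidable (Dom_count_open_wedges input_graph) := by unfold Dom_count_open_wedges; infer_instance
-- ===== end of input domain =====

-- B replaces A's nested neighbour-pair loop (one membership test per pair) by complement
-- counting: per node it adds C(k,2) in closed form and subtracts the closed pairs,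
-- obtained as one set-intersection cardinality per anchor neighbour.

-- ===== PORT A =====
def count_open_wedges (input_graph : List (Int × List Int)) : Int :=
  let d := PySem.Dict.ofList input_graph
  d.keys.foldl (fun acc v =>
    let neighbours := PySem.List.sorted (PySem.Set.ofList (d.getD v [])) (fun x => x) false
    (PySem.List.pyRange 0 (PySem.List.len neighbours)).foldl (fun acc i =>
      (PySem.List.pyRange (i + 1) (PySem.List.len neighbours)).foldl (fun acc j =>
        let u := PySem.List.pyGetD neighbours i 0
        let w := PySem.List.pyGetD neighbours j 0
        if w ∉ d.getD u [] then acc + 1 else acc) acc) acc) 0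

-- ===== PORT B =====
def count_open_wedges_alt (input_graph : List (Int × List Int)) : Int :=
  let d := PySem.Dict.ofList input_graph
  d.keys.foldl (fun total v =>
    let ns := PySem.List.sorted (PySem.Set.ofList (d.getD v [])) (fun x => x) false
    let k : Int := PySem.List.len ns
    let total := total + PySem.Int.floordiv (k * (k - 1)) 2
    (PySem.List.pyRange 0 (k - 1)).foldl (fun total i =>
      total - PySem.Set.len (PySem.Set.inter
        (PySem.Set.ofList (d.getD (PySem.List.pyGetD ns i 0) []))
        (PySem.List.slice ns (some (i + 1)) none))) total) 0

-- ===== PRECONDITION & SPEC =====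
-- Pre_ excludes exactly the inputs where the Python A raises KeyError: A looks up
-- input_graph[u] for every stored neighbour u that is smaller than some other stored
-- neighbour of the same node, so all such u must themselves be keys of the dict.
def Pre_count_open_wedges (input_graph : List (Int × List Int)) : Prop :=
  ((PySem.Dict.ofList input_graph).items.all (fun p =>
    p.2.all (fun w =>
      !(p.2.any (fun x => decide (w < x))) ||
        (PySem.Dict.ofList input_graph).contains w))) = true
instance (input_graph : List (Int × List Int)) : Decidable (Pre_count_open_wedges input_graph) := by unfold Pre_count_open_wedges; infer_instance

def pvWitness_count_open_wedges : (List (Int × List Int)) := [(1, [2, 3]), (2, [])]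

def Spec_count_open_wedges (input_graph : List (Int × List Int)) (out : Int) : Prop := out = count_open_wedges_alt input_graph
instance (input_graph : List (Int × List Int)) (out : Int) : Decidable (Spec_count_open_wedges input_graph out) := by unfold Spec_count_open_wedges; infer_instance

-- ===== CLAIM (what is proved, stated in full; the proofs are below) =====
def Claim_equal_count_open_wedges : Prop := ∀ (input_graph : List (Int × List Int)), Dom_count_open_wedges input_graph → Pre_count_open_wedges input_graph → Spec_count_open_wedges input_graph (count_open_wedges input_graph)

-- ===== LEMMAS AND PROOFS =====

-- A's per-node nested index loops, reduced to a sum over Nat indices.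
theorem loopA_eq_sum (S : Int → List Int) (ns : List Int) (acc : Int) :
    (PySem.List.pyRange 0 (PySem.List.len ns)).foldl (fun acc i =>
      (PySem.List.pyRange (i + 1) (PySem.List.len ns)).foldl (fun acc j =>
        if PySem.List.pyGetD ns j 0 ∉ S (PySem.List.pyGetD ns i 0) then acc + 1 else acc) acc) acc
    = acc + ((List.range ns.length).map (fun t =>
        (((ns.drop (t + 1)).countP (fun w => decide (w ∉ S (ns.getD t 0)))) : Int))).sum := by
  have hinner : ∀ (i acc0 : Int), 0 ≤ i →
      (PySem.List.pyRange (i + 1) (PySem.List.len ns)).foldl (fun acc j =>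
        if PySem.List.pyGetD ns j 0 ∉ S (PySem.List.pyGetD ns i 0) then acc + 1 else acc) acc0
      = acc0 + ((ns.drop (i + 1).toNat).countP (fun w => decide (w ∉ S (PySem.List.pyGetD ns i 0))) : Int) := by
    intro i acc0 hi
    rw [PySem.List.foldl_pyRange_pyGetD ns 0
          (fun acc w => if w ∉ S (PySem.List.pyGetD ns i 0) then acc + 1 else acc) acc0
          (by omega : (0:Int) ≤ i + 1)]
    have h : (fun (acc : Int) w => if w ∉ S (PySem.List.pyGetD ns i 0) then acc + 1 else acc)
        = (fun acc w => if (fun w => decide (w ∉ S (PySem.List.pyGetD ns i 0))) w = true then acc + 1 else acc) := by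
      funext a w; simp
    rw [h, PySem.List.foldl_count_if]
  rw [PySem.List.foldl_congr_mem _ _
    (fun acc i => acc + ((ns.drop (i + 1).toNat).countP (fun w => decide (w ∉ S (PySem.List.pyGetD ns i 0))) : Int)) acc
    (by
      intro a i hi
      exact hinner i a (PySem.List.mem_pyRange_one.mp hi).1)]
  rw [PySem.List.foldl_add, PySem.List.pyRange_one, List.map_map]
  have hl : (PySem.List.len ns - 0).toNat = ns.length := by simp [PySem.List.len_eq]
  rw [hl]
  congr 1
  congr 1
  apply List.map_congr_left
  intro k _
  simp only [Function.comp, zero_add, PySem.List.pyGetD_natCast]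
  congr 2

-- B's per-node loop, reduced to the same index form.
theorem loopB_eq_sum (S : Int → List Int) (ns : List Int) (total : Int) :
    (PySem.List.pyRange 0 (PySem.List.len ns - 1)).foldl (fun total i =>
      total - PySem.Set.len (PySem.Set.inter
        (PySem.Set.ofList (S (PySem.List.pyGetD ns i 0)))
        (PySem.List.slice ns (some (i + 1)) none))) total
    = total - ((List.range (ns.length - 1)).map (fun t =>
        (((PySem.Set.inter (PySem.Set.ofList (S (ns.getD t 0))) (ns.drop (t + 1))).length) : Int))).sum := by
  set c : Int → Int := fun i => PySem.Set.len (PySem.Set.inter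
        (PySem.Set.ofList (S (PySem.List.pyGetD ns i 0)))
        (PySem.List.slice ns (some (i + 1)) none)) with hc
  have hfold : ∀ (l : List Int) (a : Int), l.foldl (fun acc x => acc - c x) a = a - (l.map c).sum := by
    intro l a
    have h : (fun (acc : Int) x => acc - c x) = (fun acc x => acc + (fun y => -(c y)) x) := by
      funext acc x; ring
    rw [h, PySem.List.foldl_add]
    have : (l.map (fun y => -(c y))).sum = -((l.map c).sum) := by
      induction l with
      | nil => simp
      | cons x xs ih => simp [ih]; ring
    rw [this]; ring
  rw [hfold]
  congr 1
  rw [PySem.List.pyRange_one]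
  have hl : (PySem.List.len ns - 1 - 0).toNat = ns.length - 1 := by
    simp [PySem.List.len_eq]
  rw [hl, List.map_map]
  congr 1
  apply List.map_congr_left
  intro k _
  simp only [Function.comp, hc, zero_add, PySem.Set.len, PySem.List.pyGetD_natCast]
  rw [PySem.List.slice_from ns (show (0:Int) ≤ (k:Int) + 1 by omega),
      show (((k:Int)) + 1).toNat = k + 1 by omega]

-- cardinality of a set intersection = count of matching elements of the (nodup) right list
theorem inter_length_eq_countP (s t : List Int) (hs : s.Nodup) (ht : t.Nodup) :
    (PySem.Set.inter s t).length = t.countP (fun w => decide (w ∈ s)) := by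
  show (s.filter (fun x => PySem.Set.contains t x)).length = _
  rw [List.countP_eq_length_filter]
  rw [← List.toFinset_card_of_nodup (hs.filter _),
      ← List.toFinset_card_of_nodup (ht.filter _)]
  congr 1
  ext a
  simp only [List.mem_toFinset, List.mem_filter, PySem.Set.contains_eq_listContains]
  simp
  tauto

-- C(k,2) grows by k-1 when the list grows by one element
theorem floordiv_choose_succ (m : Nat) :
    PySem.Int.floordiv (((m:Int) + 1) * ((m:Int) + 1 - 1)) 2
      = PySem.Int.floordiv ((m:Int) * ((m:Int) - 1)) 2 + (m:Int) := by
  rw [PySem.Int.floordiv_eq_ediv_of_pos (by norm_num),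
      PySem.Int.floordiv_eq_ediv_of_pos (by norm_num)]
  have h : ((m:Int) + 1) * ((m:Int) + 1 - 1) = (m:Int) * ((m:Int) - 1) + (m:Int) * 2 := by ring
  rw [h, Int.add_mul_ediv_right _ _ (by norm_num : (2:Int) ≠ 0)]

-- the per-node identity, for any Nodup neighbour list
theorem pernode (S : Int → List Int) (ns : List Int) (h : ns.Nodup) :
    ((List.range ns.length).map (fun t =>
        (((ns.drop (t + 1)).countP (fun w => decide (w ∉ S (ns.getD t 0)))) : Int))).sum
    = PySem.Int.floordiv ((ns.length : Int) * ((ns.length : Int) - 1)) 2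
      - ((List.range (ns.length - 1)).map (fun t =>
        (((PySem.Set.inter (PySem.Set.ofList (S (ns.getD t 0))) (ns.drop (t + 1))).length) : Int))).sum := by
  induction ns with
  | nil => simp [PySem.Int.floordiv]
  | cons u tl ih =>
    have htl : tl.Nodup := h.of_cons
    have hA : ((List.range (u :: tl).length).map (fun t =>
          ((((u :: tl).drop (t + 1)).countP (fun w => decide (w ∉ S ((u :: tl).getD t 0)))) : Int))).sum
        = (tl.countP (fun w => decide (w ∉ S u)) : Int)
          + ((List.range tl.length).map (fun t =>
            (((tl.drop (t + 1)).countP (fun w => decide (w ∉ S (tl.getD t 0)))) : Int))).sum := by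
      simp only [List.range_succ_eq_map, List.map_cons, List.map_map, List.sum_cons,
        List.length_cons, List.drop_succ_cons, List.getD_cons_succ, List.getD_cons_zero,
        List.drop_zero, Function.comp_def]
    have hB : ((List.range ((u :: tl).length - 1)).map (fun t =>
          (((PySem.Set.inter (PySem.Set.ofList (S ((u :: tl).getD t 0))) ((u :: tl).drop (t + 1))).length) : Int))).sum
        = ((PySem.Set.inter (PySem.Set.ofList (S u)) tl).length : Int)
          + ((List.range (tl.length - 1)).map (fun t =>
            (((PySem.Set.inter (PySem.Set.ofList (S (tl.getD t 0))) (tl.drop (t + 1))).length) : Int))).sum := by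
      cases tl with
      | nil => simp [PySem.Set.inter]
      | cons x tl2 =>
        simp [List.range_succ_eq_map, List.map_map, Function.comp_def]
    rw [hA, hB, ih htl]
    have hfl : PySem.Int.floordiv (((u :: tl).length : Int) * (((u :: tl).length : Int) - 1)) 2
        = PySem.Int.floordiv ((tl.length : Int) * ((tl.length : Int) - 1)) 2 + (tl.length : Int) := by
      have h2 := floordiv_choose_succ tl.length
      simpa using h2
    rw [hfl]
    have hcnt : (PySem.Set.inter (PySem.Set.ofList (S u)) tl).length
        = tl.countP (fun w => decide (w ∈ S u)) := by
      rw [inter_length_eq_countP _ _ (PySem.Set.nodup_ofList _) htl]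
      apply List.countP_congr
      intro x _
      simp [PySem.Set.mem_ofList]
    have hpart : tl.length = tl.countP (fun w => decide (w ∈ S u))
        + tl.countP (fun w => decide (w ∉ S u)) := by
      have h3 := tl.length_eq_countP_add_countP (fun w => decide (w ∈ S u))
      simpa using h3
    rw [hcnt]
    push_cast [hpart]
    ring

-- ===== VERDICT (by name: the statement is the Claim_ definition above) =====
theorem count_open_wedges_spec : Claim_equal_count_open_wedges := by
  intro g _ _
  unfold Spec_count_open_wedges count_open_wedges count_open_wedges_alt
  apply PySem.List.foldl_congr_mem
  intro acc v _
  set d := PySem.Dict.ofList g with hd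
  set ns := PySem.List.sorted (PySem.Set.ofList (d.getD v [])) (fun x => x) false with hns
  have hnd : ns.Nodup :=
    (PySem.List.sorted_perm _ _ _).nodup_iff.mpr (PySem.Set.nodup_ofList _)
  rw [loopA_eq_sum (fun u => d.getD u []) ns acc,
      loopB_eq_sum (fun u => d.getD u []) ns (acc + PySem.Int.floordiv (PySem.List.len ns * (PySem.List.len ns - 1)) 2),
      pernode (fun u => d.getD u []) ns hnd]
  simp [PySem.List.len_eq]
  ring
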